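-- pv_equiv track=rewrite | github.com/Tbearly55/ageOfWarSim | main.py | is_viable_bl_hash
-- ===== SOURCE A (Python) =====
-- def is_viable_bl_hash(players_roll, bl_object):
--     bl_hash = {}
--     players_hash = {}
--     for i in bl_object:
--         if i not in bl_hash:
--             bl_hash[i] = 0
--         bl_hash[i] += 1
--     for i in players_roll:
--         if i not in players_hash:
--             players_hash[i] = 0
--         players_hash[i] += 1
--
--     win_count = 0
--     for i in bl_hash:
--         if i in players_hash and i in bl_hash:
--             if players_hash[i] >= bl_hash[i]:
--                 win_count += 1
--
--     return win_count >= len(bl_hash)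
-- ===== SOURCE B (Python) =====
-- def is_viable_bl_hash(players_roll, bl_object):
--     # Greedy consumption: walk bl_object once, removing each element's first
--     # occurrence from a pool copied from players_roll; fail fast if absent.
--     pool = list(players_roll)
--     for x in bl_object:
--         if x in pool:
--             pool.remove(x)
--         else:
--             return False
--     return True
-- ===== Notes on version B (the rewrite author's own statement) =====
-- stated objective: alternative
-- what changed: Replaced the two count dictionaries and the win_count key loop with greedy consumption: walk bl_object once, removing each element's first occurrence from a mutable pool copied from players_roll and failing fast if an element is absent; no counting at all.
import Mathlib
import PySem

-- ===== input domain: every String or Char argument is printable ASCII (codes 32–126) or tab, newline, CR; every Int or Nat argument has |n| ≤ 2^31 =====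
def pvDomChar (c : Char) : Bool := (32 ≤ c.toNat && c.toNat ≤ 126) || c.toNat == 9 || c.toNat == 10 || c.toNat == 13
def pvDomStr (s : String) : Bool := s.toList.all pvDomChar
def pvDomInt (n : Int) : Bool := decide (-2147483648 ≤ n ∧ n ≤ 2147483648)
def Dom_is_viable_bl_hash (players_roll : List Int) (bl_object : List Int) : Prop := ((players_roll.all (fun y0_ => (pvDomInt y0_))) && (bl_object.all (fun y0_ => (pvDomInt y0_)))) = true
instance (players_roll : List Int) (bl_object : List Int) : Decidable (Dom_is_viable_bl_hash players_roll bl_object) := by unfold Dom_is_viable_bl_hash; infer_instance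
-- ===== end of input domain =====

-- B replaces A's two count dictionaries and the win_count key loop with greedy consumption:
-- one pass over bl_object, removing each element's first occurrence from a pool copied from
-- players_roll, failing fast if absent (alternative decomposition; same return value).

-- ===== PORT A =====
def is_viable_bl_hash (players_roll : List Int) (bl_object : List Int) : Bool :=
  let bl_hash := bl_object.foldl (fun d i =>
      let d := if !(d.contains i) then d.insert i (0 : Int) else d
      d.insert i (d.getD i 0 + 1)) PySem.Dict.empty
  let players_hash := players_roll.foldl (fun d i =>
      let d := if !(d.contains i) then d.insert i (0 : Int) else d
      d.insert i (d.getD i 0 + 1)) PySem.Dict.empty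
  let win_count := bl_hash.keys.foldl (fun w i =>
      if players_hash.contains i && bl_hash.contains i then
        if bl_hash.getD i 0 ≤ players_hash.getD i 0 then w + 1 else w
      else w) (0 : Int)
  decide ((bl_hash.size : Int) ≤ win_count)

-- ===== PORT B =====
-- the 'for x in bl_object' loop with early return, pool threaded through; 'pool.remove(x)'
-- (remove first occurrence) is List.erase, guarded by 'x in pool' exactly as in Source B
def blConsume (bl : List Int) (pool : List Int) : Bool :=
  match bl with
  | [] => true
  | x :: rest => if pool.contains x then blConsume rest (pool.erase x) else false

def is_viable_bl_hash_alt (players_roll : List Int) (bl_object : List Int) : Bool :=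
  blConsume bl_object players_roll

-- ===== PRECONDITION & SPEC =====
def Spec_is_viable_bl_hash (players_roll : List Int) (bl_object : List Int) (out : Bool) : Prop := out = is_viable_bl_hash_alt players_roll bl_object
instance (players_roll : List Int) (bl_object : List Int) (out : Bool) : Decidable (Spec_is_viable_bl_hash players_roll bl_object out) := by unfold Spec_is_viable_bl_hash; infer_instance

-- ===== CLAIM (what is proved, stated in full; the proofs are below) =====
def Claim_equal_is_viable_bl_hash : Prop := ∀ (players_roll : List Int) (bl_object : List Int), Dom_is_viable_bl_hash players_roll bl_object → Spec_is_viable_bl_hash players_roll bl_object (is_viable_bl_hash players_roll bl_object)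

-- ===== LEMMAS AND PROOFS =====

-- greedy consumption succeeds iff every element's multiplicity in bl is covered by the pool
theorem blConsume_iff_count (bl : List Int) : ∀ (pool : List Int),
    blConsume bl pool = true ↔ ∀ y ∈ bl, bl.count y ≤ pool.count y := by
  induction bl with
  | nil => intro pool; simp [blConsume]
  | cons x rest ih =>
    intro pool
    by_cases hc : pool.contains x = true
    · have hxmem : x ∈ pool := by simpa using hc
      have hpos : 0 < pool.count x := List.count_pos_iff.mpr hxmem
      simp only [blConsume, hc, if_true, ih]
      constructor
      · intro h y hy
        rcases List.mem_cons.mp hy with rfl | hyr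
        · rw [List.count_cons_self]
          by_cases hxr : y ∈ rest
          · have := h y hxr
            rw [List.count_erase_self] at this
            omega
          · rw [List.count_eq_zero.mpr hxr]; omega
        · by_cases hyx : y = x
          · subst hyx
            have := h y hyr
            rw [List.count_erase_self] at this
            rw [List.count_cons_self]
            omega
          · have := h y hyr
            rw [List.count_erase_of_ne hyx] at this
            rw [List.count_cons_of_ne (Ne.symm hyx)]
            exact this
      · intro h y hy
        by_cases hyx : y = x
        · subst hyx
          have := h y (List.mem_cons_self)
          rw [List.count_cons_self] at this
          rw [List.count_erase_self]
          omega
        · have := h y (List.mem_cons.mpr (Or.inr hy))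
          rw [List.count_cons_of_ne (Ne.symm hyx)] at this
          rw [List.count_erase_of_ne hyx]
          exact this
    · have hxnm : x ∉ pool := by simpa using hc
      simp only [blConsume, hc]
      constructor
      · intro h; exact absurd h (by simp)
      · intro h
        have := h x (List.mem_cons_self)
        rw [List.count_cons_self, List.count_eq_zero.mpr hxnm] at this
        omega

-- A's counter-building loop is the standard Counter loop.
theorem counter_fold_eq (xs : List Int) :
    xs.foldl (fun d i =>
      let d := if !(d.contains i) then d.insert i (0 : Int) else d
      d.insert i (d.getD i 0 + 1)) PySem.Dict.empty = PySem.Dict.counter xs := by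
  rw [PySem.List.foldl_congr_mem _ _ (fun d i => d.insert i (d.getD i 0 + 1)) _ ?_,
    PySem.Dict.foldl_insert_getD_add_one_eq_counter]
  intro d i _
  by_cases h : d.contains i = true
  · simp [h]
  · simp only [Bool.not_eq_true] at h
    simp [h, PySem.Dict.getD_insert_self, PySem.Dict.insert_insert_self,
      PySem.Dict.getD_of_not_contains d (0:Int) h]

-- A's result is the multiset-containment condition
theorem A_eq_count (players_roll bl_object : List Int) :
    is_viable_bl_hash players_roll bl_object
      = bl_object.all (fun x => decide (bl_object.count x ≤ players_roll.count x)) := by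
  unfold is_viable_bl_hash
  simp only [counter_fold_eq, PySem.Dict.keys_counter]
  set p : Int → Bool := fun x => decide (bl_object.count x ≤ players_roll.count x) with hp
  have hwin :
      (PySem.Set.ofList bl_object).foldl (fun w i =>
        if (PySem.Dict.counter players_roll).contains i && (PySem.Dict.counter bl_object).contains i then
          if (PySem.Dict.counter bl_object).getD i 0 ≤ (PySem.Dict.counter players_roll).getD i 0 then w + 1 else w
        else w) (0 : Int)
      = ((PySem.Set.ofList bl_object).countP p : Int) := by
    rw [PySem.List.foldl_congr_mem _ _ (fun w i => if p i then w + 1 else w) _ ?_,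
      PySem.List.foldl_count_if, zero_add]
    intro w i hi
    rw [PySem.Set.mem_ofList] at hi
    rw [PySem.Dict.contains_counter, PySem.Dict.contains_counter,
      PySem.Dict.getD_counter, PySem.Dict.getD_counter]
    by_cases hc : players_roll.contains i = true
    · have hbl : bl_object.contains i = true := by simpa using hi
      simp only [hc, hbl, Bool.and_self, if_true, hp]
      by_cases hle : bl_object.count i ≤ players_roll.count i
      · simp [hle]
      · simp [hle]
    · have hnm : i ∉ players_roll := by simpa using hc
      have h0 : players_roll.count i = 0 := List.count_eq_zero.mpr hnm
      have h1 : 0 < bl_object.count i := List.count_pos_iff.mpr hi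
      have hpf : p i = false := by simp only [hp, h0]; simp; omega
      simp only [hpf]
      simp
      intro hm _
      exact absurd hm hnm
  rw [hwin]
  have hsize : (PySem.Dict.counter bl_object).size = (PySem.Set.ofList bl_object).length := by
    simp [PySem.Dict.size, PySem.Dict.items_counter]
  rw [hsize]
  have hle := List.countP_le_length (p := p) (l := PySem.Set.ofList bl_object)
  by_cases hall : ∀ x ∈ bl_object, p x = true
  · have : (PySem.Set.ofList bl_object).countP p = (PySem.Set.ofList bl_object).length := by
      rw [List.countP_eq_length]
      intro a ha
      exact hall a ((PySem.Set.mem_ofList _ _).mp ha)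
    simp [this, List.all_eq_true.mpr hall]
  · have hlt : (PySem.Set.ofList bl_object).countP p < (PySem.Set.ofList bl_object).length := by
      rcases lt_or_eq_of_le hle with h | h
      · exact h
      · exfalso
        rw [List.countP_eq_length] at h
        exact hall fun x hx => h x ((PySem.Set.mem_ofList _ _).mpr hx)
    have hA : decide (((PySem.Set.ofList bl_object).length : Int) ≤ ((PySem.Set.ofList bl_object).countP p : Int)) = false := by
      simp only [decide_eq_false_iff_not, not_le, Int.ofNat_lt]
      exact_mod_cast hlt
    have hB : bl_object.all p = false := by
      rw [Bool.eq_false_iff]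
      intro h
      exact hall (List.all_eq_true.mp h)
    rw [hA, hB]

theorem main_eq (players_roll bl_object : List Int) :
    is_viable_bl_hash players_roll bl_object = is_viable_bl_hash_alt players_roll bl_object := by
  rw [A_eq_count, is_viable_bl_hash_alt, Bool.eq_iff_iff,
    blConsume_iff_count, List.all_eq_true]
  constructor
  · intro h y hy; exact of_decide_eq_true (h y hy)
  · intro h y hy; exact decide_eq_true (h y hy)

-- ===== VERDICT (by name: the statement is the Claim_ definition above) =====
theorem is_viable_bl_hash_spec : Claim_equal_is_viable_bl_hash := by
  intro players_roll bl_object _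
  exact main_eq players_roll bl_object
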